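-- pv_equiv track=rewrite | github.com/ksenxx/kiss_ai | src/kiss/agents/kiss_evolve/algotune/run_algotune.py | _extract_solve_body
-- ===== SOURCE A (Python) =====
-- def _extract_solve_body(solve_source: str) -> str:
--     """Extract the body of a solve method, skipping docstrings."""
--     lines = solve_source.split("\n")
--     body_lines = []
--     in_body = False
--     in_docstring = False
--     docstring_char = None
--     base_indent = None
--
--     for line in lines:
--         stripped = line.strip()
--
--         # Skip until we find 'def solve'
--         if not in_body:
--             if stripped.startswith("def solve"):
--                 in_body = True
--             continue
--
--         # Handle docstrings
--         if not in_docstring: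
--             if stripped.startswith('"""') or stripped.startswith("'''"):
--                 docstring_char = stripped[:3]
--                 if stripped.count(docstring_char) >= 2:
--                     continue  # Single-line docstring
--                 in_docstring = True
--                 continue
--         else:
--             if docstring_char and docstring_char in stripped:
--                 in_docstring = False
--             continue
--
--         # Skip leading empty lines
--         if base_indent is None:
--             if not stripped:
--                 continue
--             base_indent = len(line) - len(line.lstrip())
--
--         # Re-indent for embedding in _solve_internal
--         if stripped:
--             original_indent = len(line) - len(line.lstrip())
--             relative_indent = max(0, original_indent - base_indent)
--             body_lines.append("        " + " " * relative_indent + stripped)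
--         else:
--             body_lines.append("")
--
--     return "\n".join(body_lines)
-- ===== SOURCE B (Python) =====
-- def _extract_solve_body(solve_source: str) -> str:
--     """Phase-decomposed rewrite: locate 'def solve', strip docstrings with an
--     index walk, then reindent the survivors in a separate pass."""
--     lines = solve_source.split("\n")
--
--     # Phase 1: find the 'def solve' line.
--     start = None
--     for i, line in enumerate(lines):
--         if line.strip().startswith("def solve"):
--             start = i
--             break
--     if start is None:
--         return ""
--     rest = lines[start + 1:]
--
--     # Phase 2: drop docstring lines (index walk instead of a state flag).
--     survivors = []
--     i = 0
--     n = len(rest)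
--     while i < n:
--         stripped = rest[i].strip()
--         if stripped.startswith('"""') or stripped.startswith("'''"):
--             quote = stripped[:3]
--             if stripped.count(quote) < 2:
--                 i += 1
--                 while i < n and quote not in rest[i].strip():
--                     i += 1
--             i += 1
--             continue
--         survivors.append(rest[i])
--         i += 1
--
--     # Phase 3: reindent, fixing the base indent from the first non-blank line.
--     k = 0
--     while k < len(survivors) and not survivors[k].strip():
--         k += 1
--     if k == len(survivors):
--         return ""
--     first = survivors[k]
--     base_indent = len(first) - len(first.lstrip())
--     out = []
--     for line in survivors[k:]:
--         stripped = line.strip()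
--         if stripped:
--             indent = len(line) - len(line.lstrip())
--             out.append("        " + " " * max(0, indent - base_indent) + stripped)
--         else:
--             out.append("")
--     return "\n".join(out)
-- ===== Notes on version B (the rewrite author's own statement) =====
-- stated objective: alternative
-- what changed: Replaces A's single flag-laden loop (in_body/in_docstring/base_indent threaded through one pass) with three separate phases: locate the solve-definition line and slice it off, remove docstring lines with a nested index walk carrying no boolean state, then a standalone reindent pass over the surviving lines.
import Mathlib
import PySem

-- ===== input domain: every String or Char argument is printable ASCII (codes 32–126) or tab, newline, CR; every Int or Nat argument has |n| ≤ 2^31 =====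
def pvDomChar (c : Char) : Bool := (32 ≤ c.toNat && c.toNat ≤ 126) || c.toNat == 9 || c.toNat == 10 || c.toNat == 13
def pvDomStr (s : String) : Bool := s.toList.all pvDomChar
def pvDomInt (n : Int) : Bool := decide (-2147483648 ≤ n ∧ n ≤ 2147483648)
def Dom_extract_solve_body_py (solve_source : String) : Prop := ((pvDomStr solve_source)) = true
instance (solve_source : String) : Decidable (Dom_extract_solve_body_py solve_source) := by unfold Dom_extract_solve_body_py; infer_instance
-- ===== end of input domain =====

-- B re-implements A's single flag-laden extraction loop as three separate phases
-- (locate the solve definition, strip docstrings by an index walk, reindent survivors); same result, same cost (objective: alternative).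


-- ===== PORT A =====
-- len(line) - len(line.lstrip())
def pvIndent (line : String) : Int :=
  PySem.Str.len line - PySem.Str.len (PySem.Str.lstrip line)

-- "        " + " " * max(0, indent - base) + stripped  (the re-indent expression both Pythons contain)
def pvReLine (line stripped : String) (base : Int) : String :=
  String.ofList ("        ".toList ++ List.replicate (max 0 (pvIndent line - base)).toNat ' ' ++ stripped.toList)

-- the tail of A's loop body: base_indent detection and re-indentation
def pvA_body (q : Option String) (base : Option Int) (acc : List String)
    (line stripped : String) : Bool × Bool × Option String × Option Int × List String :=
  match base with
  | none =>
      if stripped = "" then (true, false, q, none, acc)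
      else (true, false, q, some (pvIndent line), acc ++ [pvReLine line stripped (pvIndent line)])
  | some b =>
      if stripped = "" then (true, false, q, some b, acc ++ [""])
      else (true, false, q, some b, acc ++ [pvReLine line stripped b])

-- one iteration of A's for-loop; state = (in_body, in_docstring, docstring_char, base_indent, body_lines)
def pvA_step : (Bool × Bool × Option String × Option Int × List String) → String →
    Bool × Bool × Option String × Option Int × List String
  | (false, inDoc, q, base, acc), line =>
      if PySem.Str.startswith (PySem.Str.strip line) "def solve" then (true, inDoc, q, base, acc)
      else (false, inDoc, q, base, acc)
  | (true, false, q, base, acc), line =>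
      let stripped := PySem.Str.strip line
      if (PySem.Str.startswith stripped "\"\"\"" || PySem.Str.startswith stripped "'''") = true then
        if 2 ≤ PySem.Str.count stripped (PySem.Str.slice stripped none (some 3)) then
          (true, false, some (PySem.Str.slice stripped none (some 3)), base, acc)
        else (true, true, some (PySem.Str.slice stripped none (some 3)), base, acc)
      else pvA_body q base acc line stripped
  | (true, true, q, base, acc), line =>
      match q with
      | some dq =>
          if dq ≠ "" ∧ PySem.Str.isIn dq (PySem.Str.strip line) = true then (true, false, some dq, base, acc)
          else (true, true, some dq, base, acc)
      | none => (true, true, none, base, acc)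

def extract_solve_body_py (solve_source : String) : String :=
  PySem.Str.join "\n"
    ((((PySem.Str.split? solve_source "\n").getD []).foldl pvA_step
        (false, false, none, none, [])).2.2.2.2)

-- ===== PORT B =====
-- phase 1: the lines after the solve-definition header line
def pvFindDef : List String → Option (List String)
  | [] => none
  | l :: ls => if PySem.Str.startswith (PySem.Str.strip l) "def solve" then some ls else pvFindDef ls

-- inner while of phase 2: consume up to and including the closing line
def pvDropClose (q : String) : List String → List String
  | [] => []
  | l :: ls => if PySem.Str.isIn q (PySem.Str.strip l) then ls else pvDropClose q ls

-- cited by pvStripDocs's decreasing_by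
theorem pvDropClose_length_le (q : String) (ls : List String) :
    (pvDropClose q ls).length ≤ ls.length := by
  induction ls with
  | nil => simp [pvDropClose]
  | cons l ls ih =>
      simp only [pvDropClose]
      split
      · simp
      · exact Nat.le_succ_of_le ih

-- phase 2: remove docstring lines
def pvStripDocs : List String → List String
  | [] => []
  | l :: ls =>
      let st := PySem.Str.strip l
      if (PySem.Str.startswith st "\"\"\"" || PySem.Str.startswith st "'''") = true then
        if 2 ≤ PySem.Str.count st (PySem.Str.slice st none (some 3)) then pvStripDocs ls
        else pvStripDocs (pvDropClose (PySem.Str.slice st none (some 3)) ls)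
      else l :: pvStripDocs ls
  termination_by ls => ls.length
  decreasing_by
    · simp
    · exact Nat.lt_succ_of_le (pvDropClose_length_le _ _)
    · simp

-- phase 3: skip leading blank survivors …
def pvSkipBlanks : List String → List String
  | [] => []
  | l :: ls => if PySem.Str.strip l = "" then pvSkipBlanks ls else l :: ls

-- … and re-indent each remaining line against the base indent
def pvReFn (base : Int) (line : String) : String :=
  let stripped := PySem.Str.strip line
  if stripped = "" then "" else pvReLine line stripped base

def pvReindent (ss : List String) : List String :=
  match pvSkipBlanks ss with
  | [] => []
  | l :: ls => (l :: ls).map (pvReFn (pvIndent l))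

def extract_solve_body_py_alt (solve_source : String) : String :=
  match pvFindDef ((PySem.Str.split? solve_source "\n").getD []) with
  | none => ""
  | some rest => PySem.Str.join "\n" (pvReindent (pvStripDocs rest))

-- ===== PRECONDITION & SPEC =====
def Spec_extract_solve_body_py (solve_source : String) (out : String) : Prop := out = extract_solve_body_py_alt solve_source
instance (solve_source : String) (out : String) : Decidable (Spec_extract_solve_body_py solve_source out) := by unfold Spec_extract_solve_body_py; infer_instance

-- ===== CLAIM (what is proved, stated in full; the proofs are below) =====
def Claim_equal_extract_solve_body_py : Prop := ∀ (solve_source : String), Dom_extract_solve_body_py solve_source → Spec_extract_solve_body_py solve_source (extract_solve_body_py solve_source)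

-- ===== LEMMAS AND PROOFS =====
-- A's interleaved base-indent/reindent step, on the (base_indent, body_lines) components only
def pvBodyStep (s : Option Int × List String) (line : String) : Option Int × List String :=
  let stripped := PySem.Str.strip line
  match s.1 with
  | none =>
      if stripped = "" then s
      else (some (pvIndent line), s.2 ++ [pvReLine line stripped (pvIndent line)])
  | some b =>
      if stripped = "" then (some b, s.2 ++ [""])
      else (some b, s.2 ++ [pvReLine line stripped b])

-- phase 1 ≡ A's not-in_body state
theorem pvA_find (ls : List String) :
    ls.foldl pvA_step (false, false, none, none, []) =
      match pvFindDef ls with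
      | none => (false, false, none, none, [])
      | some rest => rest.foldl pvA_step (true, false, none, none, []) := by
  induction ls with
  | nil => rfl
  | cons l ls ih =>
      simp only [List.foldl_cons, pvFindDef, pvA_step]
      by_cases h : PySem.Str.startswith (PySem.Str.strip l) "def solve" = true
      · simp only [if_pos h]
      · simp only [if_neg h]; exact ih

-- the inner while of phase 2 ≡ A's in_docstring state (base_indent/body_lines components)
theorem pvA_close (q : String) (hq : q ≠ "") (base : Option Int) (acc : List String) :
    ∀ ls : List String,
      (ls.foldl pvA_step (true, true, some q, base, acc)).2.2.2 =
        ((pvDropClose q ls).foldl pvA_step (true, false, some q, base, acc)).2.2.2 := by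
  intro ls
  induction ls with
  | nil => rfl
  | cons l ls ih =>
      simp only [List.foldl_cons, pvDropClose, pvA_step]
      by_cases h : PySem.Str.isIn q (PySem.Str.strip l) = true
      · simp only [if_pos h, if_pos (And.intro hq h)]
      · simp only [if_neg h, if_neg (fun hc : q ≠ "" ∧ _ => h hc.2)]
        exact ih

-- A's body step equals pvBodyStep with the flags re-attached
theorem pvA_body_eq (q : Option String) (base : Option Int) (acc : List String) (l : String) :
    pvA_body q base acc l (PySem.Str.strip l) =
      (true, false, q, (pvBodyStep (base, acc) l).1, (pvBodyStep (base, acc) l).2) := by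
  cases base <;> simp only [pvA_body, pvBodyStep] <;> split_ifs <;> rfl

-- A's in_body loop ≡ phase 2 followed by the interleaved reindent fold
theorem pvA_main : ∀ (n : Nat) (ls : List String), ls.length ≤ n →
    ∀ (q : Option String) (base : Option Int) (acc : List String),
      (ls.foldl pvA_step (true, false, q, base, acc)).2.2.2 =
        (pvStripDocs ls).foldl pvBodyStep (base, acc) := by
  intro n
  induction n with
  | zero =>
      intro ls hls q base acc
      have : ls = [] := List.eq_nil_of_length_eq_zero (Nat.le_zero.mp hls)
      subst this; simp [pvStripDocs]
  | succ n ih =>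
      intro ls hls q base acc
      match ls with
      | [] => simp [pvStripDocs]
      | l :: ls =>
          have hls' : ls.length ≤ n := by simpa using hls
          simp only [List.foldl_cons, pvStripDocs, pvA_step]
          by_cases hq3 : (PySem.Str.startswith (PySem.Str.strip l) "\"\"\"" ||
              PySem.Str.startswith (PySem.Str.strip l) "'''") = true
          · have hne : PySem.Str.slice (PySem.Str.strip l) none (some 3) ≠ "" := by
              rcases Bool.or_eq_true_iff.mp hq3 with h | h <;>
              · have hpre := (PySem.Chars.startswith_iff _ _).mp
                  (by simpa [PySem.Str.startswith_eq] using h)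
                intro hcon
                have h0 : (PySem.Str.slice (PySem.Str.strip l) none (some 3)).toList = [] := by
                  rw [hcon]; rfl
                rw [PySem.Str.toList_slice, PySem.Chars.slice_eq_listSlice,
                    PySem.List.slice_to _ (by norm_num), PySem.Str.toList_strip] at h0
                rcases List.take_eq_nil_iff.mp h0 with h9 | h9
                · norm_num at h9
                · rw [h9] at hpre
                  simp at hpre
            by_cases hcnt : 2 ≤ PySem.Str.count (PySem.Str.strip l)
                (PySem.Str.slice (PySem.Str.strip l) none (some 3))
            · simp only [if_pos hq3, if_pos hcnt]
              exact ih ls hls' _ base acc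
            · simp only [if_pos hq3, if_neg hcnt]
              rw [pvA_close _ hne base acc ls]
              exact ih _ (le_trans (pvDropClose_length_le _ _) hls') _ base acc
          · simp only [if_neg hq3, pvA_body_eq, List.foldl_cons]
            rw [ih ls hls' q _ _, Prod.mk.eta]

-- the interleaved fold with base_indent fixed is a map
theorem pvBody_some (ss : List String) : ∀ (b : Int) (acc : List String),
    ss.foldl pvBodyStep (some b, acc) = (some b, acc ++ ss.map (pvReFn b)) := by
  induction ss with
  | nil => simp
  | cons l ls ih =>
      intro b acc
      simp only [List.foldl_cons, List.map_cons, pvBodyStep, pvReFn]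
      by_cases h : PySem.Str.strip l = ""
      · simp only [if_pos h, ih, List.append_assoc, List.singleton_append]
      · simp only [if_neg h, ih, List.append_assoc, List.singleton_append]

-- the interleaved fold from base_indent = None ≡ phase 3
theorem pvBody_none (ss : List String) : ∀ acc : List String,
    ss.foldl pvBodyStep (none, acc) =
      match pvSkipBlanks ss with
      | [] => (none, acc)
      | l :: ls => (some (pvIndent l), acc ++ (l :: ls).map (pvReFn (pvIndent l))) := by
  induction ss with
  | nil => intro acc; rfl
  | cons l ls ih =>
      intro acc
      simp only [List.foldl_cons, pvSkipBlanks]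
      by_cases h : PySem.Str.strip l = ""
      · rw [show pvBodyStep (none, acc) l = (none, acc) by simp only [pvBodyStep, if_pos h]]
        simp only [if_pos h]
        exact ih acc
      · rw [show pvBodyStep (none, acc) l =
              (some (pvIndent l), acc ++ [pvReLine l (PySem.Str.strip l) (pvIndent l)]) by
            simp only [pvBodyStep, if_neg h]]
        rw [pvBody_some]
        simp only [List.map_cons, pvReFn, if_neg h, List.append_assoc,
          List.singleton_append]

-- ===== VERDICT (by name: the statement is the Claim_ definition above) =====
theorem extract_solve_body_py_spec : Claim_equal_extract_solve_body_py := by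
  unfold Claim_equal_extract_solve_body_py
  intro s _
  unfold Spec_extract_solve_body_py extract_solve_body_py extract_solve_body_py_alt
  rw [pvA_find]
  cases hf : pvFindDef ((PySem.Str.split? s "\n").getD []) with
  | none => rfl
  | some rest =>
      have hacc : ((rest.foldl pvA_step (true, false, none, none, [])).2.2.2).2 =
          ((pvStripDocs rest).foldl pvBodyStep (none, [])).2 := by
        rw [pvA_main rest.length rest le_rfl none none []]
      simp only []
      rw [show (rest.foldl pvA_step (true, false, none, none, [])).2.2.2.2 =
            ((pvStripDocs rest).foldl pvBodyStep (none, [])).2 from hacc]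
      rw [pvBody_none]
      unfold pvReindent
      cases hsb : pvSkipBlanks (pvStripDocs rest) with
      | nil => rfl
      | cons l ls => simp
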